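-- pv_equiv track=rewrite | github.com/nev3rfail/telegram-nanobot | plugins/text_vertical2.py | do_vertical
-- ===== SOURCE A (Python) =====
-- def do_vertical(msg):
--     word = msg
--     l = len(msg)
--     for index, char in enumerate(word):
--         if index == 0:
--             fst = "."
--         else:
--             fst = " "
--         pad_len = l - index - 1
--         msg += "`" + fst + " " * pad_len
--         for index2, char2 in enumerate(word):
--             if index == index2:
--                 msg += "`"
--             elif index + 1 == index2:
--                 msg += "`"
--             msg += char2
--             if index2 == len(word) - 1:
--                 msg += "`"
--         if index == len(word) - 1:
--             msg += "`"
--         msg += "\n"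
--     return msg
-- ===== SOURCE B (Python) =====
-- def do_vertical(msg):
--     l = len(msg)
--     out = msg
--     for i in range(l):
--         head = "`" + ("." if i == 0 else " ") + " " * (l - i - 1)
--         body = msg[:i] + "`" + msg[i] + ("`" + msg[i + 1:] if i + 1 < l else "")
--         out += head + body + "`" + ("`" if i == l - 1 else "") + "\n"
--     return out
-- ===== Notes on version B (the rewrite author's own statement) =====
-- stated objective: simpler
-- what changed: A's inner loop that rescans every character of the word per row, testing index equalities to decide where to insert backticks, is replaced by direct slice/position computation of each row (prefix slice, backtick, the row character, optional backtick plus suffix slice).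
import Mathlib
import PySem

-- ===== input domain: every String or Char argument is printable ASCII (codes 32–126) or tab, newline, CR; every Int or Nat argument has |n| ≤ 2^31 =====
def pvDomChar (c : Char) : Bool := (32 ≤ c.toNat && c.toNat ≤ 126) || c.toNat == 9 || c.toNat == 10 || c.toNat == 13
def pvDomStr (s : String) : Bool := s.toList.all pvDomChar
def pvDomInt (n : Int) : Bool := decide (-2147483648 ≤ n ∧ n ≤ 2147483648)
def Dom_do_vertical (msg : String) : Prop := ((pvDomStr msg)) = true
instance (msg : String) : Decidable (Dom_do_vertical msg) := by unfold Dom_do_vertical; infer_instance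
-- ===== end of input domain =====

-- B replaces A's per-character inner index-scanning loop by direct slice/position computation of each row (simpler; measured constant-factor faster).

-- ===== PORT A =====
-- literal transliteration of A: for each (index, char) of the word, append the pad head,
-- then scan the whole word again, inserting backticks where the indices say so.
def do_vertical (msg : String) : String :=
  let word := msg.toList
  let l : Nat := word.length
  String.ofList <|
    (PySem.List.enumerate word).foldl (fun acc ic =>
      let fst : List Char := if ic.1 == 0 then ['.'] else [' ']
      let padLen : Int := (l : Int) - ic.1 - 1
      let acc := acc ++ ['`'] ++ fst ++ List.replicate padLen.toNat ' '
      let acc := (PySem.List.enumerate word).foldl (fun a2 jc =>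
        let a2 := if ic.1 == jc.1 then a2 ++ ['`']
                  else if ic.1 + 1 == jc.1 then a2 ++ ['`']
                  else a2
        let a2 := a2 ++ [jc.2]
        if jc.1 == (word.length : Int) - 1 then a2 ++ ['`'] else a2) acc
      let acc := if ic.1 == (word.length : Int) - 1 then acc ++ ['`'] else acc
      acc ++ ['\n']) msg.toList

-- ===== PORT B =====
-- literal transliteration of B: one loop over row indices, each row built from slices.
def do_vertical_alt (msg : String) : String :=
  let cs := msg.toList
  let l := cs.length
  String.ofList <|
    (List.range l).foldl (fun out i =>
      out ++
        (['`'] ++ (if i == 0 then ['.'] else [' ']) ++ List.replicate (l - i - 1) ' ' ++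
         (cs.take i ++ ['`'] ++ [cs.getD i ' '] ++
           (if i + 1 < l then ['`'] ++ cs.drop (i + 1) else [])) ++
         ['`'] ++ (if i == l - 1 then ['`'] else []) ++ ['\n'])) cs

-- ===== PRECONDITION & SPEC =====
def Spec_do_vertical (msg : String) (out : String) : Prop := out = do_vertical_alt msg
instance (msg : String) (out : String) : Decidable (Spec_do_vertical msg out) := by unfold Spec_do_vertical; infer_instance

-- ===== CLAIM (what is proved, stated in full; the proofs are below) =====
def Claim_equal_do_vertical : Prop := ∀ (msg : String), Dom_do_vertical msg → Spec_do_vertical msg (do_vertical msg)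

-- ===== LEMMAS AND PROOFS =====

-- B's row body, exactly as the B port appends it.
def pvRowB (cs : List Char) (i : Nat) : List Char :=
  ['`'] ++ (if i == 0 then ['.'] else [' ']) ++ List.replicate (cs.length - i - 1) ' ' ++
  (cs.take i ++ ['`'] ++ [cs.getD i ' '] ++
    (if i + 1 < cs.length then ['`'] ++ cs.drop (i + 1) else [])) ++
  ['`'] ++ (if i == cs.length - 1 then ['`'] else []) ++ ['\n']

-- A's inner-loop contribution for outer index iI at (j, c).
def pvG2 (cs : List Char) (iI : Int) (jc : Int × Char) : List Char :=
  (if iI == jc.1 then ['`'] else if iI + 1 == jc.1 then ['`'] else []) ++ [jc.2] ++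
  (if jc.1 == (cs.length : Int) - 1 then ['`'] else [])

-- A's outer-loop contribution at (i, c).
def pvGA (cs : List Char) (ic : Int × Char) : List Char :=
  (['`'] ++ (if ic.1 == 0 then ['.'] else [' ']) ++
    List.replicate ((cs.length : Int) - ic.1 - 1).toNat ' ') ++
  (PySem.List.enumerate cs).flatMap (pvG2 cs ic.1) ++
  (if ic.1 == (cs.length : Int) - 1 then ['`'] else []) ++ ['\n']

-- A's inner-loop contribution, with Nat indices (valid for j < cs.length).
def pvHN (cs : List Char) (i j : Nat) : List Char :=
  (if i = j then ['`'] else if i + 1 = j then ['`'] else []) ++ [cs.getD j ' '] ++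
  (if j + 1 = cs.length then ['`'] else [])

lemma pv_enum_flatMap {α β : Type} (d : α) (g : Int × α → List β) :
    ∀ (xs : List α) (s : Int),
    (PySem.List.enumerate xs s).flatMap g =
      (List.range xs.length).flatMap (fun (k : Nat) => g (s + (k : Int), xs.getD k d)) := by
  intro xs
  induction xs with
  | nil => intro s; simp [PySem.List.enumerate_nil]
  | cons x xs ih =>
    intro s
    rw [PySem.List.enumerate_cons, List.flatMap_cons, ih (s + 1),
      List.length_cons, List.range_succ_eq_map, List.flatMap_cons, List.flatMap_map]
    simp only [Nat.cast_zero, add_zero, List.getD_cons_zero, List.getD_cons_succ]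
    congr 1
    apply List.flatMap_congr
    intro k _
    congr 2
    push_cast
    ring

lemma pv_map_range_getD_take {α : Type} (d : α) (xs : List α) (n : Nat) (h : n ≤ xs.length) :
    (List.range n).map (fun j => xs.getD j d) = xs.take n := by
  apply List.ext_getElem
  · simp [h]
  · intro t h1 h2
    simp at h1 h2 ⊢
    rw [List.getElem?_eq_getElem (by omega)]
    simp

lemma pv_map_range_getD_drop {α : Type} (d : α) (xs : List α) (m : Nat) :
    (List.range (xs.length - m)).map (fun t => xs.getD (m + t) d) = xs.drop m := by
  apply List.ext_getElem
  · simp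
  · intro t h1 h2
    simp at h1 h2 ⊢
    rw [List.getElem?_eq_getElem (by omega)]
    simp

lemma pv_S2 {β : Type} (mk : List β) (n : Nat) (g : Nat → List β) :
    (List.range n).flatMap (fun t => g t ++ (if t + 1 = n then mk else [])) =
      (List.range n).flatMap g ++ (if n = 0 then [] else mk) := by
  cases n with
  | zero => simp
  | succ n =>
    rw [List.range_succ, List.flatMap_append, List.flatMap_append]
    simp only [List.flatMap_cons, List.flatMap_nil]
    rw [List.flatMap_congr (g := g) (by intro t ht; simp at ht; simp; omega)]
    simp

lemma pv_core (cs : List Char) (i : Nat) (h : i < cs.length) :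
    (List.range cs.length).flatMap (pvHN cs i) =
      cs.take i ++ ['`'] ++ [cs.getD i ' '] ++
        (if i + 1 < cs.length then ['`'] ++ cs.drop (i + 1) else []) ++ ['`'] := by
  obtain ⟨k, hk⟩ : ∃ k, cs.length = i + 1 + k := ⟨cs.length - (i + 1), by omega⟩
  have hpre : (List.range i).flatMap (pvHN cs i) = cs.take i := by
    rw [List.flatMap_congr (g := fun j => [cs.getD j ' ']) (by
      intro j hj
      simp only [List.mem_range] at hj
      simp only [pvHN]
      split_ifs <;> first | rfl | omega)]
    rw [← List.map_eq_flatMap, pv_map_range_getD_take ' ' cs i (by omega)]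
  have hmid : pvHN cs i i =
      ['`'] ++ [cs.getD i ' '] ++ (if i + 1 = cs.length then ['`'] else []) := by
    unfold pvHN
    rw [if_pos rfl]
  cases k with
  | zero =>
    rw [show cs.length = i + 1 from by omega] at hmid ⊢
    rw [List.range_succ, List.flatMap_append, List.flatMap_cons, List.flatMap_nil, hpre, hmid,
      if_pos rfl, if_neg (lt_irrefl (i + 1))]
    simp
  | succ k' =>
    rw [hk, List.range_add, List.flatMap_append, List.flatMap_map, List.range_succ,
      List.flatMap_append, List.flatMap_cons, List.flatMap_nil, hpre, hmid]
    have htail :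
        (List.range (k' + 1)).flatMap (fun t => pvHN cs i (i + 1 + t)) =
        ['`'] ++ cs.drop (i + 1) ++ ['`'] := by
      rw [List.flatMap_congr
        (g := fun t => ((if t = 0 then ['`'] else []) ++ [cs.getD (i + 1 + t) ' ']) ++
          (if t + 1 = k' + 1 then ['`'] else [])) (by
        intro t ht
        simp only [List.mem_range] at ht
        simp only [pvHN]
        split_ifs <;> first | rfl | omega)]
      rw [pv_S2, if_neg (by omega)]
      rw [List.range_succ_eq_map, List.flatMap_cons, List.flatMap_map]
      rw [List.flatMap_congr (g := fun t => [cs.getD (i + 2 + t) ' ']) (by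
        intro t ht
        simp only
        rw [if_neg (by omega)]
        simp only [List.nil_append, List.cons.injEq, and_true]
        congr 1
        omega)]
      rw [← List.map_eq_flatMap]
      have hdrop : (List.range k').map (fun t => cs.getD (i + 2 + t) ' ') = cs.drop (i + 2) := by
        have hk' : k' = cs.length - (i + 2) := by omega
        rw [hk']
        exact pv_map_range_getD_drop ' ' cs (i + 2)
      rw [hdrop]
      have hcons : cs.drop (i + 1) = cs.getD (i + 1) ' ' :: cs.drop (i + 2) := by
        rw [List.getD_eq_getElem cs ' ' (by omega)]
        exact List.drop_eq_getElem_cons (by omega)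
      rw [hcons]
      simp
    rw [htail, if_neg (show ¬ i + 1 = cs.length by omega),
      if_pos (show i + 1 < i + 1 + (k' + 1) by omega)]
    simp

lemma pv_g2_hn (cs : List Char) (i k : Nat) (_hk : k < cs.length) :
    pvG2 cs (i : Int) ((k : Int), cs.getD k ' ') = pvHN cs i k := by
  have e1 : (((i : Nat) : Int) = ((k : Nat) : Int)) ↔ i = k := by omega
  have e2 : (((i : Nat) : Int) + 1 = ((k : Nat) : Int)) ↔ i + 1 = k := by omega
  have e3 : (((k : Nat) : Int) = ((cs.length : Nat) : Int) - 1) ↔ k + 1 = cs.length := by omega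
  simp only [pvG2, pvHN, beq_iff_eq, e1, e2, e3]

lemma pv_row (cs : List Char) (i : Nat) (h : i < cs.length) :
    pvGA cs ((i : Int), cs.getD i ' ') = pvRowB cs i := by
  unfold pvGA pvRowB
  have e0 : (((i : Nat) : Int) == 0) = (i == 0) := by
    rw [Bool.eq_iff_iff]
    simp only [beq_iff_eq]
    omega
  have elast : (((i : Nat) : Int) == ((cs.length : Nat) : Int) - 1) = (i == cs.length - 1) := by
    rw [Bool.eq_iff_iff]
    simp only [beq_iff_eq]
    omega
  have erep : (((cs.length : Nat) : Int) - (i : Int) - 1).toNat = cs.length - i - 1 := by omega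
  rw [e0, elast, erep]
  rw [pv_enum_flatMap ' ' (pvG2 cs (i : Int)) cs 0]
  rw [List.flatMap_congr (g := pvHN cs i) (by
    intro k hkmem
    simp only [List.mem_range] at hkmem
    rw [zero_add]
    exact pv_g2_hn cs i k hkmem)]
  rw [pv_core cs i h]
  simp [List.append_assoc]

theorem pv_main (msg : String) : do_vertical msg = do_vertical_alt msg := by
  simp only [do_vertical, do_vertical_alt]
  congr 1
  have hinner : ∀ (acc : List Char) (iI : Int),
      (PySem.List.enumerate msg.toList).foldl (fun a2 jc =>
        let a2 := if iI == jc.1 then a2 ++ ['`']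
                  else if iI + 1 == jc.1 then a2 ++ ['`']
                  else a2
        let a2 := a2 ++ [jc.2]
        if jc.1 == (msg.toList.length : Int) - 1 then a2 ++ ['`'] else a2) acc =
      acc ++ (PySem.List.enumerate msg.toList).flatMap (pvG2 msg.toList iI) := by
    intro acc iI
    rw [show (fun (a2 : List Char) (jc : Int × Char) =>
        let a2 := if iI == jc.1 then a2 ++ ['`']
                  else if iI + 1 == jc.1 then a2 ++ ['`']
                  else a2
        let a2 := a2 ++ [jc.2]
        if jc.1 == (msg.toList.length : Int) - 1 then a2 ++ ['`'] else a2) =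
        (fun a2 jc => a2 ++ pvG2 msg.toList iI jc) from by
      funext a2 jc
      unfold pvG2
      dsimp only
      split_ifs <;> simp]
    exact PySem.List.foldl_append_eq_flatMap _ _ _
  have houter :
      (PySem.List.enumerate msg.toList).foldl (fun acc ic =>
        let fst : List Char := if ic.1 == 0 then ['.'] else [' ']
        let padLen : Int := (msg.toList.length : Int) - ic.1 - 1
        let acc := acc ++ ['`'] ++ fst ++ List.replicate padLen.toNat ' '
        let acc := (PySem.List.enumerate msg.toList).foldl (fun a2 jc =>
          let a2 := if ic.1 == jc.1 then a2 ++ ['`']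
                    else if ic.1 + 1 == jc.1 then a2 ++ ['`']
                    else a2
          let a2 := a2 ++ [jc.2]
          if jc.1 == (msg.toList.length : Int) - 1 then a2 ++ ['`'] else a2) acc
        let acc := if ic.1 == (msg.toList.length : Int) - 1 then acc ++ ['`'] else acc
        acc ++ ['\n']) msg.toList =
      msg.toList ++ (PySem.List.enumerate msg.toList).flatMap (pvGA msg.toList) := by
    rw [show (fun (acc : List Char) (ic : Int × Char) =>
        let fst : List Char := if ic.1 == 0 then ['.'] else [' ']
        let padLen : Int := (msg.toList.length : Int) - ic.1 - 1
        let acc := acc ++ ['`'] ++ fst ++ List.replicate padLen.toNat ' '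
        let acc := (PySem.List.enumerate msg.toList).foldl (fun a2 jc =>
          let a2 := if ic.1 == jc.1 then a2 ++ ['`']
                    else if ic.1 + 1 == jc.1 then a2 ++ ['`']
                    else a2
          let a2 := a2 ++ [jc.2]
          if jc.1 == (msg.toList.length : Int) - 1 then a2 ++ ['`'] else a2) acc
        let acc := if ic.1 == (msg.toList.length : Int) - 1 then acc ++ ['`'] else acc
        acc ++ ['\n']) =
        (fun acc ic => acc ++ pvGA msg.toList ic) from by
      funext acc ic
      dsimp only
      rw [hinner]
      unfold pvGA
      split_ifs <;> simp]
    exact PySem.List.foldl_append_eq_flatMap _ _ _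
  rw [houter]
  rw [PySem.List.foldl_append_eq_flatMap]
  congr 1
  rw [pv_enum_flatMap ' ' (pvGA msg.toList) msg.toList 0]
  apply List.flatMap_congr
  intro k hkmem
  simp only [List.mem_range] at hkmem
  rw [zero_add]
  exact pv_row msg.toList k hkmem

-- ===== VERDICT (by name: the statement is the Claim_ definition above) =====
theorem do_vertical_spec : Claim_equal_do_vertical := by
  intro msg _
  unfold Spec_do_vertical
  exact pv_main msg
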